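-- pv_equiv track=rewrite | github.com/RadiumGu/dr-geopolitical-alert | src/collectors/conflict.py | _merge_timeseries
-- ===== SOURCE A (Python) =====
-- from collections import defaultdict
--
-- def _merge_timeseries(
--     a: dict[str, list[str]], b: dict[str, list[str]]
-- ) -> dict[str, list[str]]:
--     """Merge two country timeseries dicts by combining their date lists."""
--     merged: dict[str, list[str]] = defaultdict(list)
--     for iso2, dates in a.items():
--         merged[iso2].extend(dates)
--     for iso2, dates in b.items():
--         merged[iso2].extend(dates)
--     return merged
-- ===== SOURCE B (Python) =====
-- from collections import defaultdict
--
--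
-- def _merge_timeseries(
--     a: dict[str, list[str]], b: dict[str, list[str]]
-- ) -> dict[str, list[str]]:
--     """Merge two country timeseries dicts by combining their date lists.
--
--     Recursive decomposition: peel off a's first key, merge its two date
--     lists directly, and recurse on the remaining keys with that key
--     removed from b; the base case copies b."""
--     if not a:
--         return defaultdict(list, {k: list(v) for k, v in b.items()})
--     pairs = list(a.items())
--     (k, dates), rest = pairs[0], dict(pairs[1:])
--     tail = _merge_timeseries(rest, {k2: v for k2, v in b.items() if k2 != k})
--     merged = defaultdict(list)
--     merged[k] = dates + b.get(k, [])
--     merged.update(tail)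
--     return merged
-- ===== Notes on version B (the rewrite author's own statement) =====
-- stated objective: alternative
-- what changed: A iteratively accumulates into one defaultdict with two extend loops; B is a recursion on the key structure: it peels a's first key, emits its concatenated date list, and recurses on the remaining keys with that key deleted from b, copying b in the base case.
import Mathlib
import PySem

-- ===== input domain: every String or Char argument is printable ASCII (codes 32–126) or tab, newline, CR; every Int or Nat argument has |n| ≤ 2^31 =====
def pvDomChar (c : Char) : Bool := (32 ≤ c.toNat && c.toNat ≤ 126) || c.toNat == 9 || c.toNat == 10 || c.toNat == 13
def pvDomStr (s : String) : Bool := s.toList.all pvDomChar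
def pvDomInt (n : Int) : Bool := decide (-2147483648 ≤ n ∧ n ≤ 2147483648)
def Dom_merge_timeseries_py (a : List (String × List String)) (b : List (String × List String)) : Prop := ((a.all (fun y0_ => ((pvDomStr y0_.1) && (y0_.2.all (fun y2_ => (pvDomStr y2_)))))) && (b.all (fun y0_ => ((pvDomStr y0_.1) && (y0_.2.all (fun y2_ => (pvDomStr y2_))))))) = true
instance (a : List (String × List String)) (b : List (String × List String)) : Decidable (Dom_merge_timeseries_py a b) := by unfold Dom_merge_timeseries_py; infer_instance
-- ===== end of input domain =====

-- B replaces A's two iterative extend loops by a recursion on a's key structure: peel a's first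
-- key, emit its concatenated date list, recurse with that key removed from b (objective:
-- alternative decomposition, similar cost on realistic inputs).

-- ===== PORT A =====
-- merged = defaultdict(list); for iso2, dates in a.items(): merged[iso2].extend(dates); same for b
def merge_timeseries_py (a : List (String × List String)) (b : List (String × List String)) : List (String × List String) :=
  let merged : PySem.Dict String (List String) :=
    a.foldl (fun d p => d.modify p.1 [] (fun v => v ++ p.2)) PySem.Dict.empty
  let merged := b.foldl (fun d p => d.modify p.1 [] (fun v => v ++ p.2)) merged
  merged.items

-- ===== PORT B =====
-- if not a: copy b into a fresh defaultdict; else peel (k, dates) = first item of a,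
-- tail = recurse(rest of a, {k2: v for k2, v in b.items() if k2 != k}),
-- merged = {k: dates + b.get(k, [])}; merged.update(tail)
def merge_timeseries_py_alt (a : List (String × List String)) (b : List (String × List String)) : List (String × List String) :=
  match a with
  | [] => (b.foldl (fun d p => d.insert p.1 p.2) PySem.Dict.empty).items
  | (k, dates) :: rest =>
      let tail := merge_timeseries_py_alt rest (b.filter (fun p => p.1 != k))
      (tail.foldl (fun d p => d.insert p.1 p.2)
        (PySem.Dict.empty.insert k (dates ++ (PySem.Dict.mk b).getD k []))).items

-- ===== PRECONDITION & SPEC =====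
-- Pre_: the association lists must have duplicate-free keys — a Python dict argument can never
-- contain a duplicate key, so assoc lists with repeated keys correspond to no Python input at all.
def Pre_merge_timeseries_py (a : List (String × List String)) (b : List (String × List String)) : Prop :=
  (a.map Prod.fst).Nodup ∧ (b.map Prod.fst).Nodup
instance (a : List (String × List String)) (b : List (String × List String)) : Decidable (Pre_merge_timeseries_py a b) := by unfold Pre_merge_timeseries_py; infer_instance

def pvWitness_merge_timeseries_py : (List (String × List String)) × (List (String × List String)) :=
  ([("US", ["2024-01-01"])], [("US", ["2024-01-02"]), ("FR", ["2024-01-03"])])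

def Spec_merge_timeseries_py (a : List (String × List String)) (b : List (String × List String)) (out : List (String × List String)) : Prop := out = merge_timeseries_py_alt a b
instance (a : List (String × List String)) (b : List (String × List String)) (out : List (String × List String)) : Decidable (Spec_merge_timeseries_py a b out) := by unfold Spec_merge_timeseries_py; infer_instance

-- ===== CLAIM (what is proved, stated in full; the proofs are below) =====
def Claim_equal_merge_timeseries_py : Prop := ∀ (a : List (String × List String)) (b : List (String × List String)), Dom_merge_timeseries_py a b → Pre_merge_timeseries_py a b → Spec_merge_timeseries_py a b (merge_timeseries_py a b)

-- ===== LEMMAS AND PROOFS =====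

-- Both programs are shown equal to this common normal form: a's entries with b's dates appended,
-- then b's entries whose keys do not occur in a.
def pvCanon (a : List (String × List String)) (b : List (String × List String)) : List (String × List String) :=
  a.map (fun p => (p.1, p.2 ++ (PySem.Dict.mk b).getD p.1 []))
    ++ b.filter (fun p => !PySem.Set.contains (a.map Prod.fst) p.1)

-- The value at key c after A's extend-loop: the start value followed by all date lists filed under c.
theorem pv_getD_fold (l : List (String × List String)) (d : PySem.Dict String (List String)) (c : String) :
    (l.foldl (fun d p => d.modify p.1 [] (fun v => v ++ p.2)) d).getD c []
      = d.getD c [] ++ ((l.filter (fun p => p.1 == c)).map (·.2)).flatten := by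
  induction l generalizing d with
  | nil => simp
  | cons p t ih =>
      simp only [List.foldl_cons]
      rw [ih]
      by_cases h : c = p.1
      · simp [h]
      · have h' : ¬ p.1 = c := fun hc => h hc.symm
        simp [PySem.Dict.getD_modify, h, h']

-- First-match dict lookup on a duplicate-free assoc list, written as A's filter-and-flatten value.
theorem pv_getD_mk (a : List (String × List String)) (k : String) (h : (a.map Prod.fst).Nodup) :
    (PySem.Dict.mk a).getD k [] = ((a.filter (fun p => p.1 == k)).map (·.2)).flatten := by
  induction a with
  | nil => simp [PySem.Dict.getD_eq_get?_getD, PySem.Dict.get?]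
  | cons p t ih =>
      obtain ⟨pk, pv⟩ := p
      simp only [List.map_cons, List.nodup_cons] at h
      by_cases hk : pk = k
      · have ht : t.filter (fun q => q.1 == k) = [] := by
          rw [List.filter_eq_nil_iff]
          intro q hq hqk
          exact h.1 (hk ▸ (beq_iff_eq.mp hqk) ▸ List.mem_map_of_mem hq)
        simp [PySem.Dict.getD_eq_get?_getD, PySem.Dict.get?_mk_cons, hk, ht]
      · have hrec := ih h.2
        rw [PySem.Dict.getD_eq_get?_getD] at hrec ⊢
        simp [PySem.Dict.get?_mk_cons, hk, hrec]

-- Lookup is unchanged by deleting a different key.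
theorem pv_get_mk_filter (b : List (String × List String)) (k x : String) (hx : x ≠ k) :
    (PySem.Dict.mk (b.filter (fun p => p.1 != k))).get? x = (PySem.Dict.mk b).get? x := by
  induction b with
  | nil => rfl
  | cons p t ih =>
      by_cases hp : p.1 = k
      · have hpx : (p.1 == x) = false := by
          simp only [beq_eq_false_iff_ne, ne_eq, hp]
          exact fun hc => hx hc.symm
        rw [List.filter_cons, if_neg (by simp [hp]), PySem.Dict.get?_mk_cons, hpx, if_neg (by simp), ih]
      · rw [List.filter_cons, if_pos (by simp [hp]), PySem.Dict.get?_mk_cons,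
          PySem.Dict.get?_mk_cons, ih]

theorem pv_getD_mk_filter (b : List (String × List String)) (k x : String) (hx : x ≠ k) :
    (PySem.Dict.mk (b.filter (fun p => p.1 != k))).getD x [] = (PySem.Dict.mk b).getD x [] := by
  rw [PySem.Dict.getD_eq_get?_getD, PySem.Dict.getD_eq_get?_getD, pv_get_mk_filter b k x hx]

theorem pv_map_fst_filter (b : List (String × List String)) (q : String × List String → Bool)
    (pred : String → Bool) (h : ∀ p, q p = pred p.1) :
    (b.filter q).map Prod.fst = (b.map Prod.fst).filter pred := by
  induction b with
  | nil => rfl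
  | cons r s ihq => by_cases hr : pred r.1 <;> simp [h, hr, ihq]

-- In a Nodup-keyed list, the entries filed under p's key are exactly [p].
theorem pv_filter_eq_singleton (a : List (String × List String)) (p : String × List String)
    (hA : (a.map Prod.fst).Nodup) (hp : p ∈ a) :
    a.filter (fun q => q.1 == p.1) = [p] := by
  induction a with
  | nil => simp at hp
  | cons q s ihs =>
      simp only [List.map_cons, List.nodup_cons] at hA
      rcases List.mem_cons.mp hp with hpq | hps
      · subst hpq
        have hs : s.filter (fun r => r.1 == p.1) = [] := by
          rw [List.filter_eq_nil_iff]
          intro r hr hrk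
          exact hA.1 (by rw [← (beq_iff_eq.mp hrk)]; exact List.mem_map_of_mem hr)
        simp [hs]
      · have hq : (q.1 == p.1) = false := by
          simp only [beq_eq_false_iff_ne, ne_eq]
          intro hc
          exact hA.1 (by rw [hc]; exact List.mem_map_of_mem hps)
        simp [hq, ihs hA.2 hps]

-- B's recursion computes the normal form.
theorem pv_alt_eq_canon (a b : List (String × List String))
    (hA : (a.map Prod.fst).Nodup) (hB : (b.map Prod.fst).Nodup) :
    merge_timeseries_py_alt a b = pvCanon a b := by
  induction a generalizing b with
  | nil =>
      rw [merge_timeseries_py_alt, pvCanon]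
      rw [PySem.Dict.items_foldl_insert_fresh b Prod.fst Prod.snd PySem.Dict.empty
        (by intro p _; simp) (by simpa using hB)]
      simp [PySem.Set.contains, PySem.Dict.empty]
  | cons p t ih =>
      obtain ⟨k, dates⟩ := p
      simp only [List.map_cons, List.nodup_cons] at hA
      have hB' : ((b.filter (fun p => p.1 != k)).map Prod.fst).Nodup := by
        rw [pv_map_fst_filter b _ (fun x => x != k) (fun p => rfl)]
        exact hB.filter _
      have htail := ih (b.filter (fun p => p.1 != k)) hA.2 hB'
      rw [merge_timeseries_py_alt, htail]
      -- keys of the tail are distinct and avoid k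
      have hkeys_tail : (pvCanon t (b.filter (fun p => p.1 != k))).map Prod.fst
          = t.map Prod.fst
            ++ ((b.filter (fun p => p.1 != k)).filter
                 (fun p => !PySem.Set.contains (t.map Prod.fst) p.1)).map Prod.fst := by
        simp [pvCanon]
      have hmemk : ∀ p ∈ pvCanon t (b.filter (fun p => p.1 != k)), p.1 ≠ k := by
        intro q hq
        rw [pvCanon, List.mem_append] at hq
        rcases hq with hq | hq
        · obtain ⟨r, hr, hrq⟩ := List.mem_map.mp hq
          intro hc
          have hq1 : q.1 = r.1 := by rw [← hrq]
          exact hA.1 (by rw [← hc, hq1]; exact List.mem_map_of_mem hr)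
        · have := (List.mem_filter.mp hq).1
          have := (List.mem_filter.mp this).2
          intro hc; simp [hc] at this
      have hnd_tail : ((pvCanon t (b.filter (fun p => p.1 != k))).map Prod.fst).Nodup := by
        rw [hkeys_tail]
        refine List.Nodup.append hA.2 ?_ ?_
        · exact List.Nodup.sublist (List.Sublist.map Prod.fst List.filter_sublist) hB'
        · intro x hx hx2
          obtain ⟨r, hr, hrx⟩ := List.mem_map.mp hx2
          have h2 := (List.mem_filter.mp hr).2
          rw [hrx] at h2
          simp [PySem.Set.contains] at h2
          exact absurd hx (by simpa using h2)
      rw [PySem.Dict.items_foldl_insert_fresh (pvCanon t (b.filter (fun p => p.1 != k)))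
        Prod.fst Prod.snd
        (PySem.Dict.empty.insert k (dates ++ (PySem.Dict.mk b).getD k []))
        (by
          intro q hq
          have hqk := hmemk q hq
          simp [PySem.Dict.contains_insert, PySem.Dict.contains_empty, hqk])
        (by simpa using hnd_tail)]
      have hitems : (PySem.Dict.empty.insert k
          (dates ++ (PySem.Dict.mk b).getD k [])).items
          = [(k, dates ++ (PySem.Dict.mk b).getD k [])] := rfl
      rw [hitems]
      -- now compare to the canonical form of (k,dates)::t over b
      rw [pvCanon]
      simp only [List.cons_append]
      congr 1
      simp only [Prod.mk.eta, List.map_id', List.nil_append]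
      congr 1
      · apply List.map_congr_left
        intro q hq
        have hqk : q.1 ≠ k := by
          intro hc
          exact hA.1 (by rw [← hc]; exact List.mem_map_of_mem hq)
        rw [pv_getD_mk_filter b k q.1 hqk]
      · rw [List.filter_filter]
        apply List.filter_congr
        intro q _
        by_cases hq : q.1 = k
        · simp [PySem.Set.contains, hq]
        · have h1 : (q.1 != k) = true := by simp [bne, hq]
          have h2 : (q.1 == k) = false := by simp [hq]
          simp [PySem.Set.contains, h1, h2]

-- A's fold computes the normal form too.
theorem pv_a_eq_canon (a b : List (String × List String))
    (hA : (a.map Prod.fst).Nodup) (hB : (b.map Prod.fst).Nodup) :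
    merge_timeseries_py a b = pvCanon a b := by
  unfold merge_timeseries_py
  simp only []
  rw [← List.foldl_append]
  have hkeys : ((a ++ b).foldl (fun d p => d.modify p.1 [] (fun v => v ++ p.2)) PySem.Dict.empty).keys
      = a.map Prod.fst ++ (b.map Prod.fst).filter (fun k => !PySem.Set.contains (a.map Prod.fst) k) := by
    rw [PySem.Dict.keys_foldl_modify_key (a ++ b) Prod.fst [] (fun d p => fun v => v ++ p.2)]
    rw [PySem.Dict.keys_empty, PySem.Set.update_nil_left, List.map_append,
      PySem.Set.ofList_append, PySem.Set.update_eq_append_filter,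
      PySem.Set.ofList_eq_self_of_nodup _ hA, PySem.Set.ofList_eq_self_of_nodup _ hB]
  have hnd : ((a ++ b).foldl (fun d p => d.modify p.1 [] (fun v => v ++ p.2)) PySem.Dict.empty).keys.Nodup := by
    exact PySem.Dict.nodup_keys_foldl_modify_key (a ++ b) Prod.fst [] (fun d p => fun v => v ++ p.2)
      PySem.Dict.empty (by simp [PySem.Dict.keys_empty])
  rw [PySem.Dict.items_eq_map_keys _ hnd ([] : List String), hkeys]
  rw [List.map_append, pvCanon]
  congr 1
  · rw [List.map_map]
    apply List.map_congr_left
    intro p hp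
    simp only [Function.comp_apply]
    rw [pv_getD_fold]
    simp only [List.filter_append, List.map_append, List.flatten_append]
    rw [pv_filter_eq_singleton a p hA hp, ← pv_getD_mk b p.1 hB]
    simp
  · -- b-only keys keep exactly their b entry
    rw [← pv_map_fst_filter b _ (fun x => !PySem.Set.contains (a.map Prod.fst) x) (fun p => rfl), List.map_map]
    have hid : ∀ p ∈ b.filter (fun p => !PySem.Set.contains (a.map Prod.fst) p.1),
        ((fun k => (k, ((a ++ b).foldl (fun d p => d.modify p.1 [] (fun v => v ++ p.2)) PySem.Dict.empty).getD k [])) ∘ Prod.fst) p = p := by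
      intro p hp
      have hmem := (List.mem_filter.mp hp).1
      have hnc := (List.mem_filter.mp hp).2
      simp only [Function.comp_apply]
      rw [pv_getD_fold]
      simp only [List.filter_append, List.map_append, List.flatten_append]
      have hafilter : a.filter (fun q => q.1 == p.1) = [] := by
        rw [List.filter_eq_nil_iff]
        intro r hr hrk
        have hmm : p.1 ∈ a.map Prod.fst := by
          rw [← beq_iff_eq.mp hrk]; exact List.mem_map_of_mem hr
        simp [PySem.Set.contains] at hnc
        exact absurd hmm (by simpa using hnc)
      rw [hafilter, pv_filter_eq_singleton b p hB hmem]
      simp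
    exact (List.map_congr_left hid).trans (List.map_id' _)

-- ===== VERDICT (by name: the statement is the Claim_ definition above) =====
theorem merge_timeseries_py_spec : Claim_equal_merge_timeseries_py := by
  intro a b _hdom hpre
  unfold Spec_merge_timeseries_py
  rw [pv_a_eq_canon a b hpre.1 hpre.2, pv_alt_eq_canon a b hpre.1 hpre.2]
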